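-- pv_equiv track=rewrite | github.com/hminyeong/RecOne_AITech_01 | 알고리즘스터디/1148/1148_허민영.py | solution
-- ===== SOURCE A (Python) =====
-- def build_counter(s:str):
--     rst = dict()
--     for char in s:
--         if char in rst: rst[char]+=1
--         else: rst[char]=1
--     return rst
--
-- def solution(words, tgt):
--
--     possible = list()
--     ans = dict()
--     tgt = build_counter(tgt)
--
--     # 가능한 단어만 뽑아보기
--     for word in words:
--         p = True
--         word = build_counter(word)
--         for char in word:
--             if char not in tgt or word[char]>tgt[char]:
--                 p = False
--                 break
--         if not p: continue
--         possible.append(word)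
--
--     # puzzle 문자 하나씩 가운데로 보냈을 때, 가능한 단어들 찾기
--     for char in tgt:
--         temp = 0
--         for word in possible:
--             if char not in word: # 중간 문자는 꼭 포함해야 하므로.
--                 continue
--             temp += 1
--         ans[char] = temp
--
--     ans = ans.items()
--     max_ = max(ans, key=lambda x:x[1])[1]
--     min_ = min(ans, key=lambda x:x[1])[1]
--     max_char, min_char = list(), list()
--     for pair in ans:
--         if pair[1]==max_: max_char.append(pair[0])
--         if pair[1]==min_: min_char.append(pair[0])
--
--     return [''.join(sorted(min_char)), str(min_), ''.join(sorted(max_char)), str(max_)]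
-- ===== SOURCE B (Python) =====
-- def _tally(s):
--     d = {}
--     for c in s:
--         d[c] = d.get(c, 0) + 1
--     return d
--
-- def solution(words, tgt):
--     # one pass over the words, incrementing per-letter tallies for each accepted
--     # word, instead of rescanning the accepted list once per target letter
--     tcnt = _tally(tgt)
--     counts = {c: 0 for c in tcnt}
--     for word in words:
--         wc = _tally(word)
--         if all(c in tcnt and n <= tcnt[c] for c, n in wc.items()):
--             for c in wc:
--                 counts[c] += 1
--     lo = min(counts.values())
--     hi = max(counts.values())
--     los = ''.join(sorted(c for c, n in counts.items() if n == lo))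
--     his = ''.join(sorted(c for c, n in counts.items() if n == hi))
--     return [los, str(lo), his, str(hi)]
-- ===== Notes on version B (the rewrite author's own statement) =====
-- stated objective: alternative
-- what changed: Instead of first materialising the list of accepted word-counters and then rescanning that whole list once per distinct target letter, B makes one pass over the words and, for each accepted word, increments the per-letter tallies of its distinct letters directly; min/max are taken over the values instead of a keyed extremum over items.
import Mathlib
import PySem

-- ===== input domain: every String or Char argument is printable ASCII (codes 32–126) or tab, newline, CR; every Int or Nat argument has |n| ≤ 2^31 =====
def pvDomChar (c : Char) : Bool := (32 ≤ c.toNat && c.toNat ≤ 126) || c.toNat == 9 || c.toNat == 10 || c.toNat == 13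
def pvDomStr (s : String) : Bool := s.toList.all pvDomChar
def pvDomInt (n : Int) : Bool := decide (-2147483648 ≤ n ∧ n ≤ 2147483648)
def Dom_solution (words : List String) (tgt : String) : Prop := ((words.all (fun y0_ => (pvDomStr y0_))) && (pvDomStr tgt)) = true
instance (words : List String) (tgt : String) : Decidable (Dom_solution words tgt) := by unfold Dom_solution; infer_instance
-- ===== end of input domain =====

-- B replaces A's per-target-letter rescan of the accepted-word list by a single pass
-- over the words that increments the per-letter tallies directly (objective: alternative).

-- ===== PORT A =====
def buildCounter (s : String) : PySem.Dict Char Int :=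
  s.toList.foldl (fun rst char =>
    if rst.contains char then rst.insert char (rst.getD char 0 + 1)
    else rst.insert char 1) PySem.Dict.empty

def solution (words : List String) (tgt : String) : List String :=
  let tgtC := buildCounter tgt
  let possible := words.foldl (fun possible word =>
      let wc := buildCounter word
      let p := wc.keys.foldl (fun p char =>
          if !tgtC.contains char || decide (tgtC.getD char 0 < wc.getD char 0) then false else p) true
      if p then possible ++ [wc] else possible) []
  let ans := tgtC.keys.foldl (fun ans char =>
      let temp := possible.foldl (fun temp word => if word.contains char then temp + 1 else temp) (0 : Int)
      ans.insert char temp) PySem.Dict.empty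
  let ansItems := ans.items
  -- max()/min() on an empty sequence raise in Python: Pre_solution excludes tgt = ""
  let max_ := ((PySem.List.max? ansItems (fun x => x.2)).getD (' ', 0)).2
  let min_ := ((PySem.List.min? ansItems (fun x => x.2)).getD (' ', 0)).2
  let mm := ansItems.foldl (fun (mm : List Char × List Char) pair =>
      (if pair.2 == max_ then mm.1 ++ [pair.1] else mm.1,
       if pair.2 == min_ then mm.2 ++ [pair.1] else mm.2)) ([], [])
  [String.ofList (PySem.List.sorted mm.2 (fun c => c) false), PySem.Int.toStr min_,
   String.ofList (PySem.List.sorted mm.1 (fun c => c) false), PySem.Int.toStr max_]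

-- ===== PORT B =====
def tally (s : String) : PySem.Dict Char Int :=
  s.toList.foldl (fun d c => d.insert c (d.getD c 0 + 1)) PySem.Dict.empty

def solution_alt (words : List String) (tgt : String) : List String :=
  let tcnt := tally tgt
  let counts0 := tcnt.keys.foldl (fun d c => d.insert c (0 : Int)) PySem.Dict.empty
  let counts := words.foldl (fun counts word =>
      let wc := tally word
      if wc.items.all (fun p => tcnt.contains p.1 && decide (p.2 ≤ tcnt.getD p.1 0)) then
        -- counts[c] += 1: c is always a key of counts here, the default 0 is never used
        wc.keys.foldl (fun d c => d.modify c 0 (· + 1)) counts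
      else counts) counts0
  -- min()/max() on an empty sequence raise in Python: Pre_solution excludes tgt = ""
  let lo := (PySem.List.min? counts.values (fun x => x)).getD 0
  let hi := (PySem.List.max? counts.values (fun x => x)).getD 0
  let los := String.ofList (PySem.List.sorted ((counts.items.filter (fun p => p.2 == lo)).map (fun p => p.1)) (fun c => c) false)
  let his := String.ofList (PySem.List.sorted ((counts.items.filter (fun p => p.2 == hi)).map (fun p => p.1)) (fun c => c) false)
  [los, PySem.Int.toStr lo, his, PySem.Int.toStr hi]

-- ===== PRECONDITION & SPEC =====
-- Pre_ excludes only tgt = "", on which both Pythons raise ValueError (max()/min() of an empty sequence).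
def Pre_solution (words : List String) (tgt : String) : Prop := tgt ≠ ""
instance (words : List String) (tgt : String) : Decidable (Pre_solution words tgt) := by unfold Pre_solution; infer_instance
def pvWitness_solution : List String × String := (["ab", "cd"], "abc")

def Spec_solution (words : List String) (tgt : String) (out : List String) : Prop := out = solution_alt words tgt
instance (words : List String) (tgt : String) (out : List String) : Decidable (Spec_solution words tgt out) := by unfold Spec_solution; infer_instance

-- ===== CLAIM (what is proved, stated in full; the proofs are below) =====
def Claim_equal_solution : Prop := ∀ (words : List String) (tgt : String), Dom_solution words tgt → Pre_solution words tgt → Spec_solution words tgt (solution words tgt)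

-- ===== LEMMAS AND PROOFS =====

theorem tally_eq (s : String) : tally s = PySem.Dict.counter s.toList :=
  PySem.Dict.foldl_insert_getD_add_one_eq_counter s.toList

theorem buildCounter_eq (s : String) : buildCounter s = PySem.Dict.counter s.toList := by
  unfold buildCounter
  rw [PySem.List.foldl_congr_mem (g := fun d c => d.insert c (d.getD c 0 + 1))]
  · exact PySem.Dict.foldl_insert_getD_add_one_eq_counter _
  · intro d c _
    by_cases hc : d.contains c = true
    · simp [hc]
    · simp only [Bool.not_eq_true] at hc
      simp [hc, PySem.Dict.getD_of_not_contains d 0 hc]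

-- B's acceptance test, as one Bool
def AccB (tgt w : String) : Bool :=
  (tally w).items.all (fun p => (tally tgt).contains p.1 && decide (p.2 ≤ (tally tgt).getD p.1 0))

-- the per-letter value both programs end up associating with each target letter
def gVal (words : List String) (tgt : String) (c : Char) : Int :=
  ((words.filter (AccB tgt)).countP (fun w => (PySem.Dict.counter w.toList).contains c) : Int)

-- A's inner break-loop computes B's acceptance test
theorem innerA_eq (tgt w : String) :
    (PySem.Dict.counter w.toList).keys.foldl (fun p char =>
      if !(PySem.Dict.counter tgt.toList).contains char
          || decide ((PySem.Dict.counter tgt.toList).getD char 0 < (PySem.Dict.counter w.toList).getD char 0)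
      then false else p) true = AccB tgt w := by
  rw [PySem.List.foldl_if_false_eq]
  rw [Bool.true_and, List.not_any_eq_all_not]
  unfold AccB
  simp only [tally_eq]
  rw [PySem.Dict.items_eq_map_keys _ (PySem.Dict.nodup_keys_counter _) 0, List.all_map]
  congr 1
  funext c
  simp only [Function.comp]
  cases hc : (PySem.Dict.counter tgt.toList).contains c <;> simp
  rw [← decide_not]
  simp

theorem possible_eq (words : List String) (tgt : String) :
    words.foldl (fun possible word =>
      let wc := buildCounter word
      let p := wc.keys.foldl (fun p char =>
          if !(buildCounter tgt).contains char || decide ((buildCounter tgt).getD char 0 < wc.getD char 0) then false else p) true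
      if p then possible ++ [wc] else possible) []
    = (words.filter (AccB tgt)).map (fun w => PySem.Dict.counter w.toList) := by
  rw [PySem.List.foldl_congr_mem
    (g := fun acc w => if AccB tgt w then acc ++ [PySem.Dict.counter w.toList] else acc)]
  · exact PySem.List.foldl_append_if (AccB tgt) _ words []
  · intro acc w _
    simp only [buildCounter_eq]
    rw [innerA_eq tgt w]

theorem ansItems_eq (words : List String) (tgt : String) :
    ((buildCounter tgt).keys.foldl (fun ans char =>
        ans.insert char (((words.filter (AccB tgt)).map (fun w => PySem.Dict.counter w.toList)).foldl
          (fun temp word => if word.contains char then temp + 1 else temp) (0 : Int)))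
      PySem.Dict.empty).items
    = (PySem.Dict.counter tgt.toList).keys.map (fun c => (c, gVal words tgt c)) := by
  simp only [buildCounter_eq]
  rw [PySem.Dict.items_foldl_insert_fresh (PySem.Dict.counter tgt.toList).keys (fun a => a)
      (fun char => ((words.filter (AccB tgt)).map (fun w => PySem.Dict.counter w.toList)).foldl
          (fun temp word => if word.contains char then temp + 1 else temp) (0 : Int))
      PySem.Dict.empty (by intro a _; simp)
      (by simp only [List.map_id_fun', id_eq]; exact PySem.Dict.nodup_keys_counter tgt.toList)]
  simp only [PySem.Dict.empty, List.nil_append]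
  apply List.map_congr_left
  intro c _
  rw [PySem.List.foldl_if_add_one, List.countP_map]
  unfold gVal
  simp only [zero_add]
  rfl

theorem accB_keys_subset (tgt w : String) (h : AccB tgt w = true) :
    ∀ c ∈ (tally w).keys, c ∈ (PySem.Dict.counter tgt.toList).keys := by
  intro c hc
  unfold AccB at h
  simp only [tally_eq] at h hc
  rw [List.all_eq_true] at h
  have hmem : (c, (PySem.Dict.counter w.toList).getD c 0) ∈ (PySem.Dict.counter w.toList).items := by
    rw [PySem.Dict.items_eq_map_keys _ (PySem.Dict.nodup_keys_counter _) 0]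
    exact List.mem_map_of_mem hc
  have h2 := h _ hmem
  simp only [Bool.and_eq_true] at h2
  exact (PySem.Dict.contains_iff_mem_keys _ _).1 h2.1

theorem loopB_keys (tgt : String) (ws : List String) :
    ∀ d : PySem.Dict Char Int, d.keys = (PySem.Dict.counter tgt.toList).keys →
    (ws.foldl (fun counts word =>
        if AccB tgt word then
          (tally word).keys.foldl (fun d c => d.modify c 0 (· + 1)) counts
        else counts) d).keys = (PySem.Dict.counter tgt.toList).keys := by
  induction ws with
  | nil => intro d hd; simpa using hd
  | cons w ws ih =>
    intro d hd
    simp only [List.foldl_cons]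
    by_cases hw : AccB tgt w = true
    · rw [if_pos hw]
      apply ih
      rw [PySem.Dict.keys_foldl_modify, PySem.Set.update_eq_append_filter, hd]
      have : List.filter (fun y => !PySem.Set.contains (PySem.Dict.counter tgt.toList).keys y)
          (PySem.Set.ofList (tally w).keys) = [] := by
        rw [List.filter_eq_nil_iff]
        intro y hy
        have hmem : y ∈ (PySem.Dict.counter tgt.toList).keys :=
          accB_keys_subset tgt w hw y ((PySem.Set.mem_ofList _ _).1 hy)
        rw [PySem.Dict.keys_counter] at hmem
        simp [PySem.Set.contains, (PySem.Set.mem_ofList _ _).1 hmem]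
      rw [this, List.append_nil]
    · rw [if_neg hw]; exact ih d hd

theorem loopB_getD (tgt : String) (ws : List String) :
    ∀ (d : PySem.Dict Char Int) (c : Char),
    (ws.foldl (fun counts word =>
        if AccB tgt word then
          (tally word).keys.foldl (fun d c => d.modify c 0 (· + 1)) counts
        else counts) d).getD c 0
      = d.getD c 0 + ((ws.filter (AccB tgt)).map
          (fun w => (((tally w).keys.count c : Int)))).sum := by
  induction ws with
  | nil => intro d c; simp
  | cons w ws ih =>
    intro d c
    simp only [List.foldl_cons, List.filter_cons]
    by_cases hw : AccB tgt w = true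
    · rw [if_pos hw, if_pos hw, ih, PySem.Dict.getD_foldl_modify_add_one]
      simp only [List.map_cons, List.sum_cons]
      ring
    · rw [if_neg hw, if_neg hw, ih]

theorem counts0_items (tgt : String) :
    ((tally tgt).keys.foldl (fun d c => d.insert c (0 : Int)) PySem.Dict.empty).items
      = (PySem.Dict.counter tgt.toList).keys.map (fun c => (c, (0 : Int))) := by
  simp only [tally_eq]
  rw [PySem.Dict.items_foldl_insert_fresh (PySem.Dict.counter tgt.toList).keys (fun a => a) (fun _ => (0 : Int))
      PySem.Dict.empty (by intro a _; simp)
      (by simp only [List.map_id_fun', id_eq]; exact PySem.Dict.nodup_keys_counter tgt.toList)]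
  simp only [PySem.Dict.empty, List.nil_append]

theorem counts0_keys (tgt : String) :
    ((tally tgt).keys.foldl (fun d c => d.insert c (0 : Int)) PySem.Dict.empty).keys
      = (PySem.Dict.counter tgt.toList).keys := by
  show (((tally tgt).keys.foldl (fun d c => d.insert c (0 : Int)) PySem.Dict.empty).items.map Prod.fst) = _
  rw [counts0_items]
  simp [Function.comp_def]

theorem count_keys_ite (w : String) (c : Char) :
    (((tally w).keys.count c : Int))
      = if (PySem.Dict.counter w.toList).contains c then 1 else 0 := by
  simp only [tally_eq]
  by_cases hm : c ∈ (PySem.Dict.counter w.toList).keys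
  · rw [List.count_eq_one_of_mem (PySem.Dict.nodup_keys_counter _) hm,
      if_pos ((PySem.Dict.contains_iff_mem_keys _ _).2 hm)]
    rfl
  · rw [List.count_eq_zero_of_not_mem hm]
    rw [if_neg]
    · rfl
    · intro hcon
      exact hm ((PySem.Dict.contains_iff_mem_keys _ _).1 hcon)

theorem countsItems_eq (words : List String) (tgt : String) :
    (words.foldl (fun counts word =>
        if AccB tgt word then
          (tally word).keys.foldl (fun d c => d.modify c 0 (· + 1)) counts
        else counts)
      ((tally tgt).keys.foldl (fun d c => d.insert c (0 : Int)) PySem.Dict.empty)).items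
    = (PySem.Dict.counter tgt.toList).keys.map (fun c => (c, gVal words tgt c)) := by
  have hkeys := loopB_keys tgt words _ (counts0_keys tgt)
  rw [PySem.Dict.items_eq_map_keys _ (by rw [hkeys]; exact PySem.Dict.nodup_keys_counter _) 0, hkeys]
  apply List.map_congr_left
  intro c hc
  rw [loopB_getD]
  have h0 : ((tally tgt).keys.foldl (fun d c => d.insert c (0 : Int)) PySem.Dict.empty).getD c 0 = 0 := by
    apply PySem.Dict.getD_of_mem_items
    · rw [counts0_items]; exact List.mem_map_of_mem hc
    · rw [counts0_keys]; exact PySem.Dict.nodup_keys_counter _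
  rw [h0, zero_add]
  simp only [count_keys_ite]
  rw [PySem.List.sum_map_ite_one_zero]
  rfl

-- max()/min() commute with mapping the key out (Python's max(items, key=snd)[1] = max(values))
theorem max?_snd_cons (xs : List (Char × Int)) : ∀ m : Char × Int,
    (PySem.List.max? (m :: xs) (fun x => x.2)).map Prod.snd = some ((xs.map Prod.snd).foldl max m.2) := by
  induction xs with
  | nil => intro m; rfl
  | cons y ys ih =>
    intro m
    by_cases h : m.2 < y.2
    · have h1 : PySem.List.max? (m :: y :: ys) (fun x => x.2) = PySem.List.max? (y :: ys) (fun x => x.2) := by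
        unfold PySem.List.max?
        simp only [List.foldl_cons]
        congr 1
        simp [h]
      rw [h1, ih y]
      simp [max_eq_right (le_of_lt h)]
    · have h1 : PySem.List.max? (m :: y :: ys) (fun x => x.2) = PySem.List.max? (m :: ys) (fun x => x.2) := by
        unfold PySem.List.max?
        simp only [List.foldl_cons]
        congr 1
        simp [h]
      rw [h1, ih m]
      simp [max_eq_left (not_lt.1 h)]

theorem min?_snd_cons (xs : List (Char × Int)) : ∀ m : Char × Int,
    (PySem.List.min? (m :: xs) (fun x => x.2)).map Prod.snd = some ((xs.map Prod.snd).foldl min m.2) := by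
  induction xs with
  | nil => intro m; rfl
  | cons y ys ih =>
    intro m
    by_cases h : y.2 < m.2
    · have h1 : PySem.List.min? (m :: y :: ys) (fun x => x.2) = PySem.List.min? (y :: ys) (fun x => x.2) := by
        unfold PySem.List.min?
        simp only [List.foldl_cons]
        congr 1
        simp [h]
      rw [h1, ih y]
      simp [min_eq_right (le_of_lt h)]
    · have h1 : PySem.List.min? (m :: y :: ys) (fun x => x.2) = PySem.List.min? (m :: ys) (fun x => x.2) := by
        unfold PySem.List.min?
        simp only [List.foldl_cons]
        congr 1
        simp [h]
      rw [h1, ih m]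
      simp [min_eq_left (not_lt.1 h)]

theorem solution_main (words : List String) (tgt : String) (h : tgt ≠ "") :
    solution words tgt = solution_alt words tgt := by
  have hA := ansItems_eq words tgt
  have hB := countsItems_eq words tgt
  simp only [solution, solution_alt]
  rw [possible_eq words tgt, hA]
  unfold AccB at hB
  rw [show ∀ d : PySem.Dict Char Int, d.values = d.items.map Prod.snd from fun _ => rfl]
  rw [hB]
  have ht : tgt.toList ≠ [] := by
    intro hn
    apply h
    have := congrArg String.ofList hn
    simpa using this
  have hne : (PySem.Dict.counter tgt.toList).keys ≠ [] := by
    rw [PySem.Dict.keys_counter]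
    cases hl : tgt.toList with
    | nil => exact absurd hl ht
    | cons a as =>
      intro hemp
      have hm : a ∈ PySem.Set.ofList (a :: as) :=
        (PySem.Set.mem_ofList _ _).2 List.mem_cons_self
      rw [hemp] at hm
      exact List.not_mem_nil hm
  obtain ⟨k0, K', hK⟩ := List.exists_cons_of_ne_nil hne
  -- split A's two-list loop into the two filters
  rw [PySem.List.foldl_prod_mk
        (f := fun l (pair : Char × Int) => if pair.2 ==
          ((PySem.List.max? ((PySem.Dict.counter tgt.toList).keys.map (fun c => (c, gVal words tgt c)))
            (fun x => x.2)).getD (' ', 0)).2 then l ++ [pair.1] else l)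
        (g := fun l (pair : Char × Int) => if pair.2 ==
          ((PySem.List.min? ((PySem.Dict.counter tgt.toList).keys.map (fun c => (c, gVal words tgt c)))
            (fun x => x.2)).getD (' ', 0)).2 then l ++ [pair.1] else l)]
  rw [PySem.List.foldl_append_if
        (fun (pair : Char × Int) => pair.2 ==
          ((PySem.List.max? ((PySem.Dict.counter tgt.toList).keys.map (fun c => (c, gVal words tgt c)))
            (fun x => x.2)).getD (' ', 0)).2)
        (fun pair => pair.1)
        ((PySem.Dict.counter tgt.toList).keys.map (fun c => (c, gVal words tgt c))) [],
      PySem.List.foldl_append_if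
        (fun (pair : Char × Int) => pair.2 ==
          ((PySem.List.min? ((PySem.Dict.counter tgt.toList).keys.map (fun c => (c, gVal words tgt c)))
            (fun x => x.2)).getD (' ', 0)).2)
        (fun pair => pair.1)
        ((PySem.Dict.counter tgt.toList).keys.map (fun c => (c, gVal words tgt c))) []]
  simp only [List.nil_append]
  -- the two extrema agree: max(items, key=snd)[1] = max(values), same for min
  have hmax : ((PySem.List.max? ((PySem.Dict.counter tgt.toList).keys.map (fun c => (c, gVal words tgt c)))
        (fun x => x.2)).getD (' ', 0)).2
      = (PySem.List.max? (((PySem.Dict.counter tgt.toList).keys.map (fun c => (c, gVal words tgt c))).map Prod.snd)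
        (fun x => x)).getD 0 := by
    rw [hK]
    simp only [List.map_cons]
    have h1 := max?_snd_cons (K'.map (fun c => (c, gVal words tgt c))) (k0, gVal words tgt k0)
    cases hopt : PySem.List.max?
        ((k0, gVal words tgt k0) :: K'.map (fun c => (c, gVal words tgt c))) (fun x => x.2) with
    | none => exact absurd ((PySem.List.max?_eq_none_iff _ _).1 hopt) (by simp)
    | some m =>
      rw [hopt] at h1
      simp only [Option.map_some, Option.some.injEq] at h1
      rw [PySem.List.max?_id_cons]
      simpa using h1
  have hmin : ((PySem.List.min? ((PySem.Dict.counter tgt.toList).keys.map (fun c => (c, gVal words tgt c)))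
        (fun x => x.2)).getD (' ', 0)).2
      = (PySem.List.min? (((PySem.Dict.counter tgt.toList).keys.map (fun c => (c, gVal words tgt c))).map Prod.snd)
        (fun x => x)).getD 0 := by
    rw [hK]
    simp only [List.map_cons]
    have h1 := min?_snd_cons (K'.map (fun c => (c, gVal words tgt c))) (k0, gVal words tgt k0)
    cases hopt : PySem.List.min?
        ((k0, gVal words tgt k0) :: K'.map (fun c => (c, gVal words tgt c))) (fun x => x.2) with
    | none => exact absurd ((PySem.List.min?_eq_none_iff _ _).1 hopt) (by simp)
    | some m =>
      rw [hopt] at h1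
      simp only [Option.map_some, Option.some.injEq] at h1
      rw [PySem.List.min?_id_cons]
      simpa using h1
  rw [hmax, hmin]

-- ===== VERDICT (by name: the statement is the Claim_ definition above) =====
theorem solution_spec : Claim_equal_solution := by
  intro words tgt _ hpre
  exact solution_main words tgt hpre
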